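-- pv_equiv track=rewrite | github.com/AndreyVolkovBI/VkConnections | vkconnections/Helper.py | bfs
-- ===== SOURCE A (Python) =====
-- def bfs(s, adjacency):
--     parent = {s: None}
--     frontier = [s]
--     while frontier:
--         next = []
--         for u in frontier:
--             if u in adjacency:
--                 for v in adjacency[u]:
--                     if v not in parent:
--                         parent[v] = u
--                         next.append(v)
--         frontier = next
--     return parent
-- ===== SOURCE B (Python) =====
-- def bfs(s, adjacency):
--     parent = {s: None}
--     q = [s]
--     i = 0
--     while i < len(q):
--         u = q[i]
--         i += 1
--         for v in adjacency.get(u, []):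
--             if v not in parent:
--                 parent[v] = u
--                 q.append(v)
--     return parent
-- ===== Notes on version B (the rewrite author's own statement) =====
-- stated objective: idiomatic
-- what changed: Replaces the level-synchronized frontier/next double loop with the classic single-queue BFS (one flat loop over a growing queue with a read pointer), which preserves FIFO discovery order and hence the exact parent map.
import Mathlib
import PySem

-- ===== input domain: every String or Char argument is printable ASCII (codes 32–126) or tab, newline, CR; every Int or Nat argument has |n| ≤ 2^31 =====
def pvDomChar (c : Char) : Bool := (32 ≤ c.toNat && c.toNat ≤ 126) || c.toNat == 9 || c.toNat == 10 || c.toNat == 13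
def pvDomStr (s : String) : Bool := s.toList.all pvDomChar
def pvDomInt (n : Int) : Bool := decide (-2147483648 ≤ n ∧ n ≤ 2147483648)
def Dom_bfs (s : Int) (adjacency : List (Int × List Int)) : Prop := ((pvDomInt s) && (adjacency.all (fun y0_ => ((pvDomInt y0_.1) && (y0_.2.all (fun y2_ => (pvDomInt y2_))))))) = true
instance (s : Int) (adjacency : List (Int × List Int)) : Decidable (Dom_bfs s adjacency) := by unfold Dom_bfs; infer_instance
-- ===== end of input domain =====

-- B replaces A's level-synchronized frontier/next double loop by the classic single-queue BFS
-- (one flat loop over a growing queue with a read pointer); same FIFO discovery order, same parent map.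

-- Inner-loop step shared by both ports (both Pythons contain the identical
-- `if v not in parent: parent[v] = u; <next/q>.append(v)` body).
def pvStep (u : Int) (st : PySem.Dict Int (Option Int) × List Int) (v : Int) :
    PySem.Dict Int (Option Int) × List Int :=
  if st.1.contains v = false then (st.1.insert v (some u), st.2 ++ [v]) else st

-- Termination measure: adjacency-listed vertices not yet in `parent`.
def pvUndisc (adj : PySem.Dict Int (List Int)) (p : PySem.Dict Int (Option Int)) : Nat :=
  ((adj.values.flatten).toFinset.filter (fun v => p.contains v = false)).card

theorem pvUndisc_insert_le (adj : PySem.Dict Int (List Int)) (p : PySem.Dict Int (Option Int))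
    (v : Int) (x : Option Int) : pvUndisc adj (p.insert v x) ≤ pvUndisc adj p := by
  apply Finset.card_le_card
  intro w hw
  simp only [Finset.mem_filter, PySem.Dict.contains_insert, Bool.or_eq_false_iff] at hw ⊢
  exact ⟨hw.1, hw.2.2⟩

theorem pvUndisc_insert_lt (adj : PySem.Dict Int (List Int)) (p : PySem.Dict Int (Option Int))
    (v : Int) (x : Option Int) (hv : v ∈ adj.values.flatten) (hc : p.contains v = false) :
    pvUndisc adj (p.insert v x) < pvUndisc adj p := by
  apply Finset.card_lt_card
  constructor
  · intro w hw
    simp only [Finset.mem_filter, PySem.Dict.contains_insert, Bool.or_eq_false_iff] at hw ⊢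
    exact ⟨hw.1, hw.2.2⟩
  · intro hsub
    have hv' : v ∈ (adj.values.flatten).toFinset.filter (fun w => p.contains w = false) := by
      simp [Finset.mem_filter, List.mem_toFinset, hv, hc]
    have := hsub hv'
    simp [Finset.mem_filter, PySem.Dict.contains_insert] at this

theorem pvMemVals (adj : PySem.Dict Int (List Int)) (u v : Int)
    (h : v ∈ adj.getD u []) : v ∈ adj.values.flatten := by
  cases hg : adj.get? u with
  | none => rw [PySem.Dict.getD_of_get?_eq_none adj [] hg] at h; simp at h
  | some l =>
      rw [PySem.Dict.getD_of_get?_eq_some adj [] hg] at h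
      have hitems : (u, l) ∈ adj.items := PySem.Dict.mem_items_of_get?_eq_some adj hg
      exact List.mem_flatten.mpr ⟨l, List.mem_map_of_mem hitems, h⟩

theorem pvFold_le (l : List Int) (adj : PySem.Dict Int (List Int)) (u : Int)
    (hl : ∀ v ∈ l, v ∈ adj.values.flatten) :
    ∀ (p : PySem.Dict Int (Option Int)) (acc : List Int),
      pvUndisc adj (l.foldl (pvStep u) (p, acc)).1 + (l.foldl (pvStep u) (p, acc)).2.length
        ≤ pvUndisc adj p + acc.length := by
  induction l with
  | nil => intro p acc; simp
  | cons v l ih =>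
      intro p acc
      have hv : v ∈ adj.values.flatten := hl v (by simp)
      have hl' : ∀ w ∈ l, w ∈ adj.values.flatten := fun w hw => hl w (by simp [hw])
      simp only [List.foldl_cons]
      by_cases hc : p.contains v = false
      · have hstep : pvStep u (p, acc) v = (p.insert v (some u), acc ++ [v]) := by
          simp [pvStep, hc]
        rw [hstep]
        have h1 := ih hl' (p.insert v (some u)) (acc ++ [v])
        have h2 := pvUndisc_insert_lt adj p v (some u) hv hc
        simp only [List.length_append, List.length_cons, List.length_nil] at h1 ⊢
        omega
      · have hstep : pvStep u (p, acc) v = (p, acc) := by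
          simp only [pvStep, if_neg hc]
        rw [hstep]; exact ih hl' p acc

theorem pvFold_mono (l : List Int) (adj : PySem.Dict Int (List Int)) (u : Int) :
    ∀ (p : PySem.Dict Int (Option Int)) (acc : List Int),
      pvUndisc adj (l.foldl (pvStep u) (p, acc)).1 ≤ pvUndisc adj p := by
  induction l with
  | nil => intro p acc; simp
  | cons v l ih =>
      intro p acc
      simp only [List.foldl_cons]
      by_cases hc : p.contains v = false
      · have hstep : pvStep u (p, acc) v = (p.insert v (some u), acc ++ [v]) := by
          simp [pvStep, hc]
        rw [hstep]
        exact le_trans (ih _ _) (pvUndisc_insert_le adj p v (some u))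
      · have hstep : pvStep u (p, acc) v = (p, acc) := by
          simp only [pvStep, if_neg hc]
        rw [hstep]; exact ih p acc

-- ===== PORT A =====
-- body of A's `for u in frontier` loop: `if u in adjacency: for v in adjacency[u]: …`
def pvOuter (adj : PySem.Dict Int (List Int)) (st : PySem.Dict Int (Option Int) × List Int)
    (u : Int) : PySem.Dict Int (Option Int) × List Int :=
  if adj.contains u then (adj.getD u []).foldl (pvStep u) st else st

theorem pvLevel_le (f : List Int) (adj : PySem.Dict Int (List Int)) :
    ∀ (p : PySem.Dict Int (Option Int)) (acc : List Int),
      pvUndisc adj (f.foldl (pvOuter adj) (p, acc)).1 + (f.foldl (pvOuter adj) (p, acc)).2.length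
        ≤ pvUndisc adj p + acc.length := by
  induction f with
  | nil => intro p acc; simp
  | cons u f ih =>
      intro p acc
      simp only [List.foldl_cons, pvOuter]
      by_cases hc : adj.contains u
      · rw [if_pos hc]
        have h1 := pvFold_le (adj.getD u []) adj u (fun v hv => pvMemVals adj u v hv) p acc
        rcases hst : (adj.getD u []).foldl (pvStep u) (p, acc) with ⟨p', acc'⟩
        rw [hst] at h1
        exact le_trans (ih p' acc') h1
      · rw [if_neg hc]; exact ih p acc

-- A: level-synchronised BFS (`while frontier: next = []; for u in frontier: …; frontier = next`)
def bfsLoopA (adj : PySem.Dict Int (List Int)) (p : PySem.Dict Int (Option Int))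
    (frontier : List Int) : PySem.Dict Int (Option Int) :=
  if frontier.isEmpty then p
  else
    let st := frontier.foldl (pvOuter adj) (p, [])
    bfsLoopA adj st.1 st.2
termination_by 2 * pvUndisc adj p + (if frontier.isEmpty then 0 else 1)
decreasing_by
  have h := pvLevel_le frontier adj p []
  simp only [List.length_nil, Nat.add_zero] at h
  rename_i hne
  simp only [Bool.not_eq_true] at hne
  rw [hne]
  simp only [List.foldl_attach, Bool.false_eq_true, if_false]
  by_cases hE : (frontier.foldl (pvOuter adj) (p, [])).2.isEmpty = true
  · rw [if_pos hE]
    have h0 : (frontier.foldl (pvOuter adj) (p, [])).2 = [] := List.isEmpty_iff.mp hE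
    rw [h0] at h
    simp only [List.length_nil, Nat.add_zero] at h
    omega
  · rw [if_neg hE]
    have h1 : 0 < (frontier.foldl (pvOuter adj) (p, [])).2.length :=
      List.length_pos_iff.mpr (fun hnil => hE (by simp [hnil]))
    omega

def bfs (s : Int) (adjacency : List (Int × List Int)) : List (Int × Option Int) :=
  (bfsLoopA (PySem.Dict.ofList adjacency) (PySem.Dict.ofList [(s, (none : Option Int))]) [s]).items

-- ===== PORT B =====
-- B: single-queue BFS; `q` only grows, `i` is the read pointer (`while i < len(q): u = q[i]; i += 1; …`)
def bfsGoB (adj : PySem.Dict Int (List Int)) (p : PySem.Dict Int (Option Int))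
    (q : List Int) (i : Nat) : PySem.Dict Int (Option Int) :=
  if h : i < q.length then
    let u := q[i]
    let st := (adj.getD u []).foldl (pvStep u) (p, q)
    bfsGoB adj st.1 st.2 (i + 1)
  else p
termination_by 2 * pvUndisc adj p + (q.length - i)
decreasing_by
  have h1 := pvFold_le (adj.getD q[i] []) adj q[i] (fun v hv => pvMemVals adj q[i] v hv) p q
  have h2 := pvFold_mono (adj.getD q[i] []) adj q[i] p q
  omega

def bfs_alt (s : Int) (adjacency : List (Int × List Int)) : List (Int × Option Int) :=
  (bfsGoB (PySem.Dict.ofList adjacency) (PySem.Dict.ofList [(s, (none : Option Int))]) [s] 0).items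

-- ===== PRECONDITION & SPEC =====
def Spec_bfs (s : Int) (adjacency : List (Int × List Int)) (out : List (Int × Option Int)) : Prop := out = bfs_alt s adjacency
instance (s : Int) (adjacency : List (Int × List Int)) (out : List (Int × Option Int)) : Decidable (Spec_bfs s adjacency out) := by unfold Spec_bfs; infer_instance

-- ===== CLAIM (what is proved, stated in full; the proofs are below) =====
def Claim_equal_bfs : Prop := ∀ (s : Int) (adjacency : List (Int × List Int)), Dom_bfs s adjacency → Spec_bfs s adjacency (bfs s adjacency)

-- ===== LEMMAS AND PROOFS =====

-- The fold appending into an accumulator: the parent dict is independent of the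
-- accumulator, and the produced list is appended after it.
theorem pvStep_append (l : List Int) (u : Int) :
    ∀ (p : PySem.Dict Int (Option Int)) (acc : List Int),
      l.foldl (pvStep u) (p, acc)
        = ((l.foldl (pvStep u) (p, [])).1, acc ++ (l.foldl (pvStep u) (p, [])).2) := by
  induction l with
  | nil => intro p acc; simp
  | cons v l ih =>
      intro p acc
      simp only [List.foldl_cons]
      by_cases hc : p.contains v = false
      · have h1 : pvStep u (p, acc) v = (p.insert v (some u), acc ++ [v]) := by simp [pvStep, hc]
        have h2 : pvStep u (p, []) v = (p.insert v (some u), [v]) := by simp [pvStep, hc]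
        rw [h1, h2, ih (p.insert v (some u)) (acc ++ [v]), ih (p.insert v (some u)) [v]]
        simp
      · have h1 : pvStep u (p, acc) v = (p, acc) := by simp only [pvStep, if_neg hc]
        have h2 : pvStep u (p, []) v = (p, []) := by simp only [pvStep, if_neg hc]
        rw [h1, h2, ih p acc]

-- Proof-side clean single queue: pop the head, append the fresh neighbours.
def pvGoL (adj : PySem.Dict Int (List Int)) (p : PySem.Dict Int (Option Int))
    (q : List Int) : PySem.Dict Int (Option Int) :=
  match q with
  | [] => p
  | u :: rest =>
      let st := (adj.getD u []).foldl (pvStep u) (p, rest)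
      pvGoL adj st.1 st.2
termination_by 2 * pvUndisc adj p + q.length
decreasing_by
  have h1 := pvFold_le (adj.getD u []) adj u (fun v hv => pvMemVals adj u v hv) p rest
  have h2 := pvFold_mono (adj.getD u []) adj u p rest
  simp only [List.length_cons]
  omega

-- B's pointer loop is the clean queue on the not-yet-read suffix.
theorem pvGoB_eq_goL (adj : PySem.Dict Int (List Int)) :
    ∀ (p : PySem.Dict Int (Option Int)) (q : List Int) (i : Nat),
      bfsGoB adj p q i = pvGoL adj p (q.drop i) := by
  intro p q i
  induction p, q, i using bfsGoB.induct adj with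
  | case1 p q i h u st ih =>
      rw [bfsGoB, dif_pos h]
      have hdrop : q.drop i = q[i] :: q.drop (i + 1) := List.drop_eq_getElem_cons h
      rw [hdrop, pvGoL]
      have hA := pvStep_append (adj.getD q[i] []) q[i] p q
      have hB := pvStep_append (adj.getD q[i] []) q[i] p (q.drop (i + 1))
      simp only [u, st] at ih ⊢
      rw [ih, hA, hB]
      rw [List.drop_append_of_le_length (by omega)]
  | case2 p q i h =>
      rw [bfsGoB, dif_neg h]
      rw [List.drop_eq_nil_of_le (by omega), pvGoL]

-- Processing one frontier element from accumulator `nx` appends its fresh neighbours after `nx`.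
theorem pvOuter_eq (adj : PySem.Dict Int (List Int)) (p : PySem.Dict Int (Option Int))
    (nx : List Int) (u : Int) :
    pvOuter adj (p, nx) u
      = (((adj.getD u []).foldl (pvStep u) (p, [])).1,
          nx ++ ((adj.getD u []).foldl (pvStep u) (p, [])).2) := by
  unfold pvOuter
  by_cases hc : adj.contains u
  · rw [if_pos hc]; exact pvStep_append (adj.getD u []) u p nx
  · rw [if_neg hc]
    rw [PySem.Dict.getD_of_not_contains adj [] (by simpa using hc)]
    simp

-- Level synchronisation is invisible to the queue: running the queue on
-- `frontier ++ nx` equals processing the whole frontier first, then the queue.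
theorem pvLevel_to_queue (adj : PySem.Dict Int (List Int)) :
    ∀ (f : List Int) (p : PySem.Dict Int (Option Int)) (nx : List Int),
      pvGoL adj p (f ++ nx)
        = pvGoL adj (f.foldl (pvOuter adj) (p, nx)).1 (f.foldl (pvOuter adj) (p, nx)).2 := by
  intro f
  induction f with
  | nil => intro p nx; simp
  | cons u f ih =>
      intro p nx
      rw [List.cons_append, pvGoL]
      have hA := pvStep_append (adj.getD u []) u p (f ++ nx)
      simp only [hA]
      rw [List.append_assoc]
      rw [ih ((adj.getD u []).foldl (pvStep u) (p, [])).1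
            (nx ++ ((adj.getD u []).foldl (pvStep u) (p, [])).2)]
      simp only [List.foldl_cons, pvOuter_eq]

-- A's level loop equals the clean queue.
theorem pvLoopA_eq_goL (adj : PySem.Dict Int (List Int)) :
    ∀ (p : PySem.Dict Int (Option Int)) (f : List Int),
      bfsLoopA adj p f = pvGoL adj p f := by
  intro p f
  induction p, f using bfsLoopA.induct adj with
  | case1 p f h => rw [bfsLoopA, if_pos h, List.isEmpty_iff.mp h, pvGoL]
  | case2 p f h st ih =>
      rw [bfsLoopA, if_neg h]
      simp only [st, List.foldl_attach] at ih ⊢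
      rw [ih]
      have := pvLevel_to_queue adj f p []
      rw [List.append_nil] at this
      exact this.symm

-- ===== VERDICT (by name: the statement is the Claim_ definition above) =====
theorem bfs_spec : Claim_equal_bfs := by
  intro s adjacency _
  show bfs s adjacency = bfs_alt s adjacency
  unfold bfs bfs_alt
  rw [pvLoopA_eq_goL, pvGoB_eq_goL, List.drop_zero]
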